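-- pv_equiv track=rewrite | github.com/moonpiderman/Programmers | Practice/Matchlist/12985.py | solution_fail
-- ===== SOURCE A (Python) =====
-- def solution_fail(n, a, b):
--     answer = 0
--
--     while n > 0 :
--         div = n // 2
--         if a <= div and b > div :
--             while div > 0 :
--                 div //= 2
--                 answer += 1
--             return answer
--
--         else :
--             while div > 0 :
--                 div //= 2
--                 answer += 1
--             return answer
-- ===== SOURCE B (Python) =====
-- def solution_fail(n, a, b):
--     # Both branches of A are identical: count halvings of n//2, i.e. its bit length.
--     return (n // 2).bit_length()
-- ===== Notes on version B (the rewrite author's own statement) =====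
-- stated objective: simpler
-- what changed: Replaces the nested while-loops (which halve n//2 repeatedly, counting steps, with two identical branches) by the closed form (n//2).bit_length().
-- outside the precondition, e.g. on solution_fail(0, 5, 7): A returns None, B returns 0; on solution_fail(-4, 1, 2): A returns None, B returns 2
import Mathlib
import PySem

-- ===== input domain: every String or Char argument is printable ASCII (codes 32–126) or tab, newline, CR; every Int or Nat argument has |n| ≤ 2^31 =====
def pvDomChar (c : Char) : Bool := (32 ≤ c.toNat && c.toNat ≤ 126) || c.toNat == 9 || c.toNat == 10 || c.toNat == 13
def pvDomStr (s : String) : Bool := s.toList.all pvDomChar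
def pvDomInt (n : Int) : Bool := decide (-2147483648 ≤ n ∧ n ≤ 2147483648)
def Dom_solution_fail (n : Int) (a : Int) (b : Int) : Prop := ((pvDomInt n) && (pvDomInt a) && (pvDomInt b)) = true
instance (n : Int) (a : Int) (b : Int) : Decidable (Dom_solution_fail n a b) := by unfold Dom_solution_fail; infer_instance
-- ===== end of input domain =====

-- B replaces A's nested counting loops (both branches identical) by the closed form (n//2).bit_length(); simpler, same values on n > 0.


-- ===== PORT A =====
-- inner 'while div > 0 : div //= 2 ; answer += 1' (identical in both branches)
def solutionFailLoop (div : Int) (answer : Int) : Int :=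
  if h : div > 0 then solutionFailLoop (PySem.Int.floordiv div 2) (answer + 1) else answer
termination_by div.toNat
decreasing_by
  simp only [PySem.Int.floordiv, Int.fdiv_eq_ediv]
  omega

-- For n ≤ 0 the outer while never runs and Python returns None (no Int); Pre_ excludes that, 0 here is a placeholder.
def solution_fail (n : Int) (a : Int) (b : Int) : Int :=
  if n > 0 then
    let div := PySem.Int.floordiv n 2
    if a ≤ div ∧ b > div then solutionFailLoop div 0
    else solutionFailLoop div 0
  else 0

-- ===== PORT B =====
-- Python int.bit_length (on the absolute value, as Python defines it for negatives)
def pyBitLength (m : Nat) : Int :=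
  if m = 0 then 0 else pyBitLength (m / 2) + 1
termination_by m
decreasing_by omega

def solution_fail_alt (n : Int) (a : Int) (b : Int) : Int :=
  pyBitLength (PySem.Int.floordiv n 2).natAbs

-- ===== PRECONDITION & SPEC =====
-- Pre_ excludes n ≤ 0: there A's outer while never runs and the Python falls off the end, returning None (not an Int).
def Pre_solution_fail (n : Int) (a : Int) (b : Int) : Prop := 0 < n
instance (n : Int) (a : Int) (b : Int) : Decidable (Pre_solution_fail n a b) := by unfold Pre_solution_fail; infer_instance
def pvWitness_solution_fail : Int × Int × Int := (100, 3, 60)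

def Spec_solution_fail (n : Int) (a : Int) (b : Int) (out : Int) : Prop := out = solution_fail_alt n a b
instance (n : Int) (a : Int) (b : Int) (out : Int) : Decidable (Spec_solution_fail n a b out) := by unfold Spec_solution_fail; infer_instance

-- ===== CLAIM (what is proved, stated in full; the proofs are below) =====
def Claim_equal_solution_fail : Prop := ∀ (n : Int) (a : Int) (b : Int), Dom_solution_fail n a b → Pre_solution_fail n a b → Spec_solution_fail n a b (solution_fail n a b)

-- ===== LEMMAS AND PROOFS =====
lemma pyBitLength_step (d : Nat) (hd : 0 < d) : pyBitLength d = pyBitLength (d / 2) + 1 := by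
  rw [pyBitLength]
  rw [if_neg (by omega)]

lemma floordiv_two_nat (d : Nat) : PySem.Int.floordiv (d : Int) 2 = ((d / 2 : Nat) : Int) := by
  simp only [PySem.Int.floordiv, Int.fdiv_eq_ediv]
  omega

lemma loop_eq (d : Nat) (ans : Int) : solutionFailLoop (d : Int) ans = ans + pyBitLength d := by
  induction d using Nat.strong_induction_on generalizing ans with
  | _ d ih =>
    rcases Nat.eq_zero_or_pos d with h0 | h0
    · subst h0
      rw [solutionFailLoop]
      simp [pyBitLength]
    · rw [solutionFailLoop]
      rw [dif_pos (by exact_mod_cast h0)]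
      rw [floordiv_two_nat]
      rw [ih (d / 2) (by omega) (ans + 1)]
      rw [pyBitLength_step d h0]
      ring

-- ===== VERDICT (by name: the statement is the Claim_ definition above) =====
theorem solution_fail_spec : Claim_equal_solution_fail := by
  intro n a b _ hpre
  have hn : n > 0 := hpre
  unfold Spec_solution_fail solution_fail solution_fail_alt
  rw [if_pos hn]
  have hdiv : 0 ≤ PySem.Int.floordiv n 2 := by
    simp only [PySem.Int.floordiv, Int.fdiv_eq_ediv]; omega
  set d := PySem.Int.floordiv n 2 with hd
  have : d = ((d.natAbs : Nat) : Int) := by omega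
  rw [this]
  simp only []
  split
  · rw [loop_eq, Int.natAbs_natCast]; ring
  · rw [loop_eq, Int.natAbs_natCast]; ring
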